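-- pv_equiv track=rewrite | github.com/zanglab/CTCF_T-ALL_code | utilities/association_with_regions.py | get_overlap_info_regions2regions_strID
-- ===== SOURCE A (Python) =====
-- import re,bisect
--
-- def get_overlap_info_regions2regions_strID(islands,regions):
--     # for each island in islands[chrom], check if 1-overlap 0-non-overlap with regions[chrom]
--     # islands/regions represents for compare_regions/basic_region respectively
--     #island_dict = {}
--     #i=0
--     overlapped,nonoverlapped = {},{}
--     for chrom in islands:
--         if chrom not in regions:
--             for island in islands[chrom]:
--                 if chrom not in nonoverlapped:
--                     nonoverlapped[chrom] = []
--                 nonoverlapped[chrom].append(island)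
--         else:
--             # check the regions in regions[chrom] are non-overlap and sorted
--             regionlist = []
--             for region in regions[chrom]:
--                 regionlist.extend(region)
--             for num in range(len(regionlist)-1):
--                 assert regionlist[num]<regionlist[num+1]
--
--             # for each island, check if overlapped with regions[chrom]
--             for island in islands[chrom]:
--                 #ID = chrom+'_'+str(island[0])+'_'+str(island[1])+'_'+str(i)
--                 assert island[0]<=island[1]
--                 s = bisect.bisect_left(regionlist,island[0])
--                 e = bisect.bisect_right(regionlist,island[1])
--                 if s==e and s%2==0:
--                     if chrom not in nonoverlapped:
--                         nonoverlapped[chrom] = []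
--                     nonoverlapped[chrom].append(island)
--                 else:
--                     if chrom not in overlapped:
--                         overlapped[chrom] = []
--                     overlapped[chrom].append(island)
--
--     return overlapped,nonoverlapped
-- ===== SOURCE B (Python) =====
-- def _overlaps(bounds, island):
--     # closed-interval reading of the flattened boundary list: the island overlaps
--     # iff some boundary falls inside it, or it starts strictly inside an interval
--     # (an odd number of boundaries lie strictly below its start).
--     assert island[0] <= island[1]
--     return (any(island[0] <= x <= island[1] for x in bounds)
--             or sum(x < island[0] for x in bounds) % 2 == 1)
--
-- def get_overlap_info_regions2regions_strID(islands, regions):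
--     overlapped, nonoverlapped = {}, {}
--     for chrom, isls in islands.items():
--         if chrom not in regions:
--             if isls:
--                 nonoverlapped[chrom] = list(isls)
--             continue
--         bounds = [x for region in regions[chrom] for x in region]
--         for x, y in zip(bounds, bounds[1:]):
--             assert x < y
--         ov = [island for island in isls if _overlaps(bounds, island)]
--         nv = [island for island in isls if not _overlaps(bounds, island)]
--         if ov:
--             overlapped[chrom] = ov
--         if nv:
--             nonoverlapped[chrom] = nv
--     return overlapped, nonoverlapped
-- ===== Notes on version B (the rewrite author's own statement) =====
-- stated objective: simpler
-- what changed: Replaces the two binary searches and the s==e parity test per island with a direct linear scan of the flattened boundary list (a boundary inside the island, or an odd count of boundaries below its start), and builds each chromosome's overlapped/non-overlapped lists by two comprehensions assigned once instead of lazily-created dict appends.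
import Mathlib
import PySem

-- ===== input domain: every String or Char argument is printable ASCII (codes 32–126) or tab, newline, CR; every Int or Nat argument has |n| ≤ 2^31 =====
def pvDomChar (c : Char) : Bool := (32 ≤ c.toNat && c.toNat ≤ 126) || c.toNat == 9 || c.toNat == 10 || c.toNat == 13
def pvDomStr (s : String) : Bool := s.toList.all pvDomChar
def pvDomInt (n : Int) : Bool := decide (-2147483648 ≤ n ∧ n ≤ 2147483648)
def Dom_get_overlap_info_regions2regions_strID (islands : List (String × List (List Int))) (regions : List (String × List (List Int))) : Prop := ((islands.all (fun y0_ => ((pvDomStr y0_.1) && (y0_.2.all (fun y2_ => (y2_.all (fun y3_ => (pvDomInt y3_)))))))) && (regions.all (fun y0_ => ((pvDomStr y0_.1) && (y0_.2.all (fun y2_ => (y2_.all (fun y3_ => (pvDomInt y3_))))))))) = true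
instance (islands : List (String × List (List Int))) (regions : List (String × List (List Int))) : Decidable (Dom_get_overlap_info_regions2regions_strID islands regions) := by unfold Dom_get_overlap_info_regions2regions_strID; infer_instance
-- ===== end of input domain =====

-- B replaces the per-island bisect parity test with a direct linear scan of the
-- flattened boundary list and assigns each chromosome's result lists once (simpler,
-- not faster); inputs on which the Python A raises are excluded by Pre_.

-- ===== PORT A =====
-- shared dict helpers (Python dict as assoc list, first-match lookup)
def pvLookup (d : List (String × List (List Int))) (k : String) : Option (List (List Int)) :=
  (d.find? (fun p => p.1 == k)).map Prod.snd

-- `if k not in d: d[k] = []` followed by `d[k].append(v)`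
def pvAppendAt (d : List (String × List (List Int))) (k : String) (v : List Int) :
    List (String × List (List Int)) :=
  if d.any (fun p => p.1 == k) then
    d.map (fun p => if p.1 == k then (p.1, p.2 ++ [v]) else p)
  else d ++ [(k, [v])]

-- the body of A's `for chrom in islands` loop
def pvStepA (regions : List (String × List (List Int)))
    (acc : (List (String × List (List Int))) × (List (String × List (List Int))))
    (p : String × List (List Int)) :
    (List (String × List (List Int))) × (List (String × List (List Int))) :=
  match pvLookup regions p.1 with
  | none =>
      -- `for island in islands[chrom]: nonoverlapped[chrom].append(island)`
      (acc.1, p.2.foldl (fun nv isl => pvAppendAt nv p.1 isl) acc.2)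
  | some rgs =>
      -- `regionlist = []; for region in regions[chrom]: regionlist.extend(region)`
      let regionlist := rgs.foldl (fun a r => a ++ r) []
      -- (the two assert loops raise exactly outside Pre_ and are otherwise no-ops)
      p.2.foldl (fun acc2 isl =>
        let s := PySem.List.bisectLeft regionlist (PySem.List.pyGetD isl 0 0)
        let e := PySem.List.bisectRight regionlist (PySem.List.pyGetD isl 1 0)
        if s = e ∧ s % 2 = 0 then (acc2.1, pvAppendAt acc2.2 p.1 isl)
        else (pvAppendAt acc2.1 p.1 isl, acc2.2)) acc

def get_overlap_info_regions2regions_strID (islands : List (String × List (List Int))) (regions : List (String × List (List Int))) : (List (String × List (List Int))) × (List (String × List (List Int))) :=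
  islands.foldl (pvStepA regions) ([], [])

-- ===== PORT B =====
def pvOverlapsB (bounds : List Int) (isl : List Int) : Bool :=
  bounds.any (fun x => PySem.List.pyGetD isl 0 0 ≤ x && x ≤ PySem.List.pyGetD isl 1 0) ||
  (bounds.countP (fun x => decide (x < PySem.List.pyGetD isl 0 0))) % 2 == 1

-- the body of B's `for chrom, isls in islands.items()` loop
def pvStepB (regions : List (String × List (List Int)))
    (acc : (List (String × List (List Int))) × (List (String × List (List Int))))
    (p : String × List (List Int)) :
    (List (String × List (List Int))) × (List (String × List (List Int))) :=
  match pvLookup regions p.1 with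
  | none =>
      (acc.1, if p.2.isEmpty then acc.2 else acc.2 ++ [(p.1, p.2)])
  | some rgs =>
      let bounds := rgs.flatten
      let ov := p.2.filter (fun isl => pvOverlapsB bounds isl)
      let nv := p.2.filter (fun isl => !pvOverlapsB bounds isl)
      ((if ov.isEmpty then acc.1 else acc.1 ++ [(p.1, ov)]),
       (if nv.isEmpty then acc.2 else acc.2 ++ [(p.1, nv)]))

def get_overlap_info_regions2regions_strID_alt (islands : List (String × List (List Int))) (regions : List (String × List (List Int))) : (List (String × List (List Int))) × (List (String × List (List Int))) :=
  islands.foldl (pvStepB regions) ([], [])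

-- ===== PRECONDITION & SPEC =====
def pvIslOK (isl : List Int) : Bool :=
  match isl with
  | a :: b :: _ => a ≤ b
  | _ => false

-- Pre_ excludes exactly: duplicate keys in either association list (not representable as a
-- Python dict input), islands shorter than 2 elements or with island[0] > island[1]
-- (IndexError / AssertionError in A), and region lists whose flattening is not strictly
-- increasing (AssertionError in A) — each a case where the Python A raises.
def Pre_get_overlap_info_regions2regions_strID (islands : List (String × List (List Int))) (regions : List (String × List (List Int))) : Prop :=
  (islands.map Prod.fst).Nodup ∧ (regions.map Prod.fst).Nodup ∧
  ∀ p ∈ islands, ∀ q ∈ regions, q.1 = p.1 →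
    List.Pairwise (· < ·) q.2.flatten ∧ ∀ isl ∈ p.2, pvIslOK isl = true

instance (islands : List (String × List (List Int))) (regions : List (String × List (List Int))) : Decidable (Pre_get_overlap_info_regions2regions_strID islands regions) := by
  unfold Pre_get_overlap_info_regions2regions_strID; infer_instance

def pvWitness_get_overlap_info_regions2regions_strID : (List (String × List (List Int))) × (List (String × List (List Int))) :=
  ([("chr1", [[1, 5], [10, 12]]), ("chr2", [[0, 0]])], [("chr1", [[3, 8], [11, 20]])])

def Spec_get_overlap_info_regions2regions_strID (islands : List (String × List (List Int))) (regions : List (String × List (List Int))) (out : (List (String × List (List Int))) × (List (String × List (List Int)))) : Prop := out = get_overlap_info_regions2regions_strID_alt islands regions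
instance (islands : List (String × List (List Int))) (regions : List (String × List (List Int))) (out : (List (String × List (List Int))) × (List (String × List (List Int)))) : Decidable (Spec_get_overlap_info_regions2regions_strID islands regions out) := by unfold Spec_get_overlap_info_regions2regions_strID; infer_instance

-- ===== CLAIM (what is proved, stated in full; the proofs are below) =====
def Claim_equal_get_overlap_info_regions2regions_strID : Prop := ∀ (islands : List (String × List (List Int))) (regions : List (String × List (List Int))), Dom_get_overlap_info_regions2regions_strID islands regions → Pre_get_overlap_info_regions2regions_strID islands regions → Spec_get_overlap_info_regions2regions_strID islands regions (get_overlap_info_regions2regions_strID islands regions)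

-- ===== LEMMAS AND PROOFS =====

-- `d` extended (or not) by a single key-k entry holding list `l`
def pvApp (d : List (String × List (List Int))) (k : String) (l : List (List Int)) :
    List (String × List (List Int)) :=
  if l.isEmpty then d else d ++ [(k, l)]

lemma pvAppendAt_app (d : List (String × List (List Int))) (k : String)
    (l : List (List Int)) (v : List Int) (hk : ∀ p ∈ d, p.1 ≠ k) :
    pvAppendAt (pvApp d k l) k v = pvApp d k (l ++ [v]) := by
  have hd : d.any (fun p => p.1 == k) = false := by
    simp only [List.any_eq_false]; intro p hp; simpa using hk p hp
  cases l with
  | nil =>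
      have h1 : pvApp d k [] = d := by simp [pvApp]
      have h2 : pvApp d k ([] ++ [v]) = d ++ [(k, [v])] := by simp [pvApp]
      rw [h1, h2]
      unfold pvAppendAt
      rw [if_neg (by simp [hd])]
  | cons a as =>
      have h1 : pvApp d k (a :: as) = d ++ [(k, a :: as)] := by simp [pvApp]
      have h2 : pvApp d k ((a :: as) ++ [v]) = d ++ [(k, a :: (as ++ [v]))] := by
        simp [pvApp]
      rw [h1, h2]
      unfold pvAppendAt
      rw [if_pos (by simp)]
      rw [List.map_append]
      have hmap : d.map (fun p => if p.1 == k then (p.1, p.2 ++ [v]) else p) = d := by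
        conv_rhs => rw [← List.map_id d]
        exact List.map_congr_left (fun p hp => by simp [hk p hp])
      have hone : [((k : String), (a :: as : List (List Int)))].map
          (fun p => if p.1 == k then (p.1, p.2 ++ [v]) else p)
          = [(k, a :: (as ++ [v]))] := by simp
      rw [hmap, hone]

-- folding the conditional appends over the islands of one chromosome
lemma pvFoldPair (k : String) (P : List Int → Bool) (isls : List (List Int))
    (ov nov : List (String × List (List Int)))
    (hov : ∀ p ∈ ov, p.1 ≠ k) (hnov : ∀ p ∈ nov, p.1 ≠ k)
    (lo ln : List (List Int)) :
    isls.foldl (fun acc2 isl =>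
        if P isl then (pvAppendAt acc2.1 k isl, acc2.2)
        else (acc2.1, pvAppendAt acc2.2 k isl)) (pvApp ov k lo, pvApp nov k ln)
      = (pvApp ov k (lo ++ isls.filter P), pvApp nov k (ln ++ isls.filter (fun i => !P i))) := by
  induction isls generalizing lo ln with
  | nil => simp
  | cons a as ih =>
      simp only [List.foldl_cons]
      by_cases hp : P a
      · rw [if_pos hp]
        simp only [pvAppendAt_app ov k lo a hov]
        rw [ih (lo ++ [a]) ln]
        simp [hp]
      · rw [if_neg hp]
        simp only [pvAppendAt_app nov k ln a hnov]
        rw [ih lo (ln ++ [a])]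
        simp [hp]

lemma pvFoldOne (k : String) (isls : List (List Int))
    (nov : List (String × List (List Int))) (hnov : ∀ p ∈ nov, p.1 ≠ k)
    (l : List (List Int)) :
    isls.foldl (fun nv isl => pvAppendAt nv k isl) (pvApp nov k l)
      = pvApp nov k (l ++ isls) := by
  induction isls generalizing l with
  | nil => simp
  | cons a as ih =>
      simp only [List.foldl_cons, pvAppendAt_app nov k l a hnov]
      rw [ih (l ++ [a])]; simp

-- countP of a list whose first s positions satisfy p and the rest do not
lemma pvCountP_of_split (xs : List Int) (p : Int → Bool) (s : Nat) (hs : s ≤ xs.length)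
    (h1 : ∀ j (hj : j < xs.length), j < s → p xs[j])
    (h2 : ∀ j (hj : j < xs.length), s ≤ j → p xs[j] = false) :
    xs.countP p = s := by
  have hsplit : xs.countP p = (xs.take s).countP p + (xs.drop s).countP p := by
    rw [← List.countP_append, List.take_append_drop]
  have htake : (xs.take s).countP p = (xs.take s).length := by
    rw [List.countP_eq_length]
    intro a ha
    obtain ⟨i, hi, rfl⟩ := List.mem_iff_getElem.mp ha
    rw [List.getElem_take]
    exact h1 _ _ (by simp at hi; omega)
  have hdrop : (xs.drop s).countP p = 0 := by
    rw [List.countP_eq_zero]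
    intro a ha
    obtain ⟨i, hi, rfl⟩ := List.mem_iff_getElem.mp ha
    rw [List.getElem_drop]
    simp only [h2 (s + i) (by simp at hi; omega) (by omega)]
    simp
  rw [hsplit, htake, hdrop, List.length_take]
  omega

lemma pvBisectLeft_countP (xs : List Int) (x : Int) (h : List.Pairwise (· ≤ ·) xs) :
    PySem.List.bisectLeft xs x = xs.countP (fun y => decide (y < x)) := by
  obtain ⟨h0, h1, h2⟩ := PySem.List.bisectLeft_spec xs x h
  refine (pvCountP_of_split xs _ _ h0 ?_ ?_).symm
  · intro j hj hlt; simpa using h1 j hj hlt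
  · intro j hj hge; simpa using h2 j hj hge

lemma pvBisectRight_countP (xs : List Int) (x : Int) (h : List.Pairwise (· ≤ ·) xs) :
    PySem.List.bisectRight xs x = xs.countP (fun y => decide (y ≤ x)) := by
  obtain ⟨h0, h1, h2⟩ := PySem.List.bisectRight_spec xs x h
  refine (pvCountP_of_split xs _ _ h0 ?_ ?_).symm
  · intro j hj hlt; simpa using h1 j hj hlt
  · intro j hj hge; simpa using h2 j hj hge

lemma pvCountP_split_range (xs : List Int) (a b : Int) (hab : a ≤ b) :
    xs.countP (fun y => decide (y ≤ b))
      = xs.countP (fun y => decide (y < a)) + xs.countP (fun y => a ≤ y && y ≤ b) := by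
  induction xs with
  | nil => simp
  | cons x l ih =>
      simp only [List.countP_cons]
      by_cases h1 : x < a
      · have h2 : x ≤ b := le_of_lt (lt_of_lt_of_le h1 hab)
        have h3 : ¬ a ≤ x := not_le.mpr h1
        simp [h1, h2, h3, ih]; omega
      · have h3 : a ≤ x := not_lt.mp h1
        by_cases h2 : x ≤ b <;> (simp [h1, h2, h3, ih]; try omega)

-- the two per-island tests agree on a strictly increasing boundary list
lemma pvTest_eq (bounds : List Int) (isl : List Int)
    (hch : List.Pairwise (· < ·) bounds) (hok : pvIslOK isl = true) :
    (decide (PySem.List.bisectLeft bounds (PySem.List.pyGetD isl 0 0)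
        = PySem.List.bisectRight bounds (PySem.List.pyGetD isl 1 0)
      ∧ PySem.List.bisectLeft bounds (PySem.List.pyGetD isl 0 0) % 2 = 0))
      = !pvOverlapsB bounds isl := by
  obtain ⟨a, b, rest, rfl⟩ : ∃ a b rest, isl = a :: b :: rest := by
    match isl, hok with
    | a :: b :: rest, _ => exact ⟨a, b, rest, rfl⟩
  have hab : a ≤ b := by simpa [pvIslOK] using hok
  have hi0 : PySem.List.pyGetD (a :: b :: rest) 0 0 = a := by
    have h : (0:Int) ≤ (rest.length:Int) + 1 := by omega
    simp [PySem.List.pyGetD, PySem.List.pyGet?, PySem.List.pyIdx?, h]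
  have hi1 : PySem.List.pyGetD (a :: b :: rest) 1 0 = b := by
    simp [PySem.List.pyGetD, PySem.List.pyGet?, PySem.List.pyIdx?]
  have hpw : List.Pairwise (· ≤ ·) bounds := hch.imp (fun h => le_of_lt h)
  unfold pvOverlapsB
  rw [hi0, hi1, pvBisectLeft_countP bounds a hpw, pvBisectRight_countP bounds b hpw,
    pvCountP_split_range bounds a b hab]
  rcases Nat.eq_zero_or_pos (bounds.countP (fun y => a ≤ y && y ≤ b)) with hC | hC
  · have hany : bounds.any (fun x => a ≤ x && x ≤ b) = false := by
      rw [List.any_eq_false]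
      intro x hx
      simpa using List.countP_eq_zero.mp hC x hx
    rw [hany, hC]
    rcases Nat.mod_two_eq_zero_or_one (bounds.countP (fun y => decide (y < a))) with hm | hm <;>
      simp [hm]
  · have hne : bounds.countP (fun y => decide (y < a))
        ≠ bounds.countP (fun y => decide (y < a)) + bounds.countP (fun y => a ≤ y && y ≤ b) := by
      omega
    have hany : bounds.any (fun x => a ≤ x && x ≤ b) = true := by
      rw [List.any_eq_true]
      obtain ⟨x, hx, hpx⟩ := List.countP_pos_iff.mp hC
      exact ⟨x, hx, hpx⟩
    rw [hany]
    simp only [Bool.true_or, Bool.not_true]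
    exact decide_eq_false (fun hcon => hne hcon.1)

-- facts extracted from a successful dict lookup
lemma pvLookup_some (regions : List (String × List (List Int))) (k : String)
    (rgs : List (List Int)) (h : pvLookup regions k = some rgs) :
    ∃ q ∈ regions, q.1 = k ∧ q.2 = rgs := by
  unfold pvLookup at h
  obtain ⟨q, hq, rfl⟩ : ∃ q, regions.find? (fun p => p.1 == k) = some q ∧ q.2 = rgs := by
    cases hf : regions.find? (fun p => p.1 == k) with
    | none => rw [hf] at h; simp at h
    | some q => rw [hf] at h; simp at h; exact ⟨q, rfl, h⟩
  exact ⟨q, List.mem_of_find?_eq_some hq, by simpa using List.find?_some hq, rfl⟩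

-- one loop iteration: A's step equals B's step when the chromosome is fresh
lemma pvStep_eq (regions : List (String × List (List Int)))
    (ov nov : List (String × List (List Int))) (hd : String × List (List Int))
    (hov : ∀ q ∈ ov, q.1 ≠ hd.1) (hnov : ∀ q ∈ nov, q.1 ≠ hd.1)
    (hpre : ∀ q ∈ regions, q.1 = hd.1 →
      List.Pairwise (· < ·) q.2.flatten ∧ ∀ isl ∈ hd.2, pvIslOK isl = true) :
    pvStepA regions (ov, nov) hd = pvStepB regions (ov, nov) hd := by
  unfold pvStepA pvStepB
  cases hl : pvLookup regions hd.1 with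
  | none =>
      simp only []
      have := pvFoldOne hd.1 hd.2 nov hnov []
      rw [show pvApp nov hd.1 [] = nov by simp [pvApp]] at this
      rw [this]
      simp [pvApp]
  | some rgs =>
      simp only []
      obtain ⟨q, hq, hqk, hq2⟩ := pvLookup_some regions hd.1 rgs hl
      obtain ⟨hch0, hok⟩ := hpre q hq hqk
      have hch : List.Pairwise (· < ·) rgs.flatten := hq2 ▸ hch0
      have hfl : rgs.foldl (fun a r => a ++ r) [] = rgs.flatten := by
        rw [PySem.List.foldl_append_eq_flatten]; simp
      rw [hfl]
      have hcongr : hd.2.foldl (fun acc2 isl =>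
          if PySem.List.bisectLeft rgs.flatten (PySem.List.pyGetD isl 0 0)
              = PySem.List.bisectRight rgs.flatten (PySem.List.pyGetD isl 1 0)
            ∧ PySem.List.bisectLeft rgs.flatten (PySem.List.pyGetD isl 0 0) % 2 = 0
          then (acc2.1, pvAppendAt acc2.2 hd.1 isl)
          else (pvAppendAt acc2.1 hd.1 isl, acc2.2)) (ov, nov)
        = hd.2.foldl (fun acc2 isl =>
          if pvOverlapsB rgs.flatten isl then (pvAppendAt acc2.1 hd.1 isl, acc2.2)
          else (acc2.1, pvAppendAt acc2.2 hd.1 isl)) (ov, nov) := by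
        apply PySem.List.foldl_congr_mem
        intro acc2 isl hisl
        have ht := pvTest_eq rgs.flatten isl hch (hok isl hisl)
        by_cases hP : pvOverlapsB rgs.flatten isl
        · rw [hP] at ht
          have hcond := of_decide_eq_false ht
          rw [if_neg hcond, if_pos hP]
        · rw [eq_false_of_ne_true hP] at ht
          have hcond := of_decide_eq_true ht
          rw [if_pos hcond, if_neg hP]
      rw [hcongr]
      have hfold := pvFoldPair hd.1 (fun isl => pvOverlapsB rgs.flatten isl) hd.2 ov nov
        hov hnov [] []
      rw [show pvApp ov hd.1 [] = ov by simp [pvApp],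
          show pvApp nov hd.1 [] = nov by simp [pvApp]] at hfold
      rw [hfold]
      simp [pvApp]

-- keys of B's step output
lemma pvStepB_keys (regions : List (String × List (List Int)))
    (acc : (List (String × List (List Int))) × (List (String × List (List Int))))
    (hd : String × List (List Int)) :
    (∀ q ∈ (pvStepB regions acc hd).1, q ∈ acc.1 ∨ q.1 = hd.1) ∧
    (∀ q ∈ (pvStepB regions acc hd).2, q ∈ acc.2 ∨ q.1 = hd.1) := by
  have key : ∀ (d : List (String × List (List Int))) (l : List (List Int)) q,
      q ∈ (if l.isEmpty then d else d ++ [(hd.1, l)]) → q ∈ d ∨ q.1 = hd.1 := by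
    intro d l q hq
    split at hq
    · exact Or.inl hq
    · rcases List.mem_append.mp hq with h | h
      · exact Or.inl h
      · right; simp at h; rw [h]
  unfold pvStepB
  cases pvLookup regions hd.1 with
  | none => exact ⟨fun q hq => Or.inl hq, fun q hq => key acc.2 hd.2 q hq⟩
  | some rgs => exact ⟨fun q hq => key acc.1 _ q hq, fun q hq => key acc.2 _ q hq⟩

-- the main induction over chromosomes
lemma pvMain (islands : List (String × List (List Int)))
    (regions : List (String × List (List Int)))
    (ov nov : List (String × List (List Int)))
    (hnd : (islands.map Prod.fst).Nodup)
    (hodis : ∀ p ∈ islands, ∀ q ∈ ov, q.1 ≠ p.1)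
    (hndis : ∀ p ∈ islands, ∀ q ∈ nov, q.1 ≠ p.1)
    (hpre : ∀ p ∈ islands, ∀ q ∈ regions, q.1 = p.1 →
      List.Pairwise (· < ·) q.2.flatten ∧ ∀ isl ∈ p.2, pvIslOK isl = true) :
    islands.foldl (pvStepA regions) (ov, nov)
      = islands.foldl (pvStepB regions) (ov, nov) := by
  induction islands generalizing ov nov with
  | nil => rfl
  | cons hd tl ih =>
      simp only [List.foldl_cons]
      rw [pvStep_eq regions ov nov hd
        (fun q hq => hodis hd (by simp) q hq)
        (fun q hq => hndis hd (by simp) q hq)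
        (fun q hq h => hpre hd (by simp) q hq h)]
      have hfresh : hd.1 ∉ tl.map Prod.fst := by
        simp only [List.map_cons, List.nodup_cons] at hnd
        exact hnd.1
      obtain ⟨hk1, hk2⟩ := pvStepB_keys regions (ov, nov) hd
      cases hB : pvStepB regions (ov, nov) hd with
      | mk ov' nov' =>
          rw [hB] at hk1 hk2
          apply ih
          · simp only [List.map_cons, List.nodup_cons] at hnd
            exact hnd.2
          · intro p hp q hq
            rcases hk1 q hq with h | h
            · exact hodis p (by simp [hp]) q h
            · rw [h]
              intro hcontra
              exact hfresh (hcontra ▸ List.mem_map_of_mem hp)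
          · intro p hp q hq
            rcases hk2 q hq with h | h
            · exact hndis p (by simp [hp]) q h
            · rw [h]
              intro hcontra
              exact hfresh (hcontra ▸ List.mem_map_of_mem hp)
          · intro p hp q hq h
            exact hpre p (by simp [hp]) q hq h

-- ===== VERDICT (by name: the statement is the Claim_ definition above) =====
theorem get_overlap_info_regions2regions_strID_spec : Claim_equal_get_overlap_info_regions2regions_strID := by
  intro islands regions _ hpre
  unfold Spec_get_overlap_info_regions2regions_strID
  unfold get_overlap_info_regions2regions_strID get_overlap_info_regions2regions_strID_alt
  exact pvMain islands regions [] [] hpre.1 (by simp) (by simp)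
    (fun p hp q hq h => hpre.2.2 p hp q hq h)
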